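-- pv_equiv track=rewrite | github.com/alexengineered/crash_standardizer | pdf_extractor.py | tables_to_dicts
-- ===== SOURCE A (Python) =====
-- def tables_to_dicts(tables: list[list[list[str]]]) -> list[list[dict]]:
--     """
--     Convert table data to list of dictionaries using first row as headers.
--     Useful for structured police report forms.
--     """
--     result = []
--     for table in tables:
--         if len(table) < 2:
--             continue
--         headers = [str(h).strip() if h else f"col_{i}" for i, h in enumerate(table[0])]
--         rows = []
--         for row in table[1:]:
--             row_dict = {}
--             for i, cell in enumerate(row):
--                 key = headers[i] if i < len(headers) else f"col_{i}"
--                 row_dict[key] = str(cell).strip() if cell else ""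
--             rows.append(row_dict)
--         result.append(rows)
--     return result
-- ===== SOURCE B (Python) =====
-- def tables_to_dicts(tables: list[list[list[str]]]) -> list[list[dict]]:
--     """
--     Convert table data to list of dictionaries using first row as headers.
--     Useful for structured police report forms.
--     """
--     result = []
--     for table in tables:
--         if len(table) < 2:
--             continue
--         header = table[0]
--         body = table[1:]
--         dicts = [{} for _ in body]
--         width = max(len(r) for r in table)
--         for i in range(width):
--             key = str(header[i]).strip() if i < len(header) and header[i] else f"col_{i}"
--             for d, row in zip(dicts, body):
--                 if i < len(row):
--                     d[key] = str(row[i]).strip() if row[i] else ""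
--         result.append(dicts)
--     return result
-- ===== Notes on version B (the rewrite author's own statement) =====
-- stated objective: alternative
-- what changed: B transposes the traversal: it allocates one empty dict per data row and fills all of them column by column (computing each column's key once per table), instead of A's row-by-row pass that resolves the header key again for every cell; order of first insertion and last-wins per dict are unchanged because each dict still receives its keys in ascending column index.
import Mathlib
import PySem

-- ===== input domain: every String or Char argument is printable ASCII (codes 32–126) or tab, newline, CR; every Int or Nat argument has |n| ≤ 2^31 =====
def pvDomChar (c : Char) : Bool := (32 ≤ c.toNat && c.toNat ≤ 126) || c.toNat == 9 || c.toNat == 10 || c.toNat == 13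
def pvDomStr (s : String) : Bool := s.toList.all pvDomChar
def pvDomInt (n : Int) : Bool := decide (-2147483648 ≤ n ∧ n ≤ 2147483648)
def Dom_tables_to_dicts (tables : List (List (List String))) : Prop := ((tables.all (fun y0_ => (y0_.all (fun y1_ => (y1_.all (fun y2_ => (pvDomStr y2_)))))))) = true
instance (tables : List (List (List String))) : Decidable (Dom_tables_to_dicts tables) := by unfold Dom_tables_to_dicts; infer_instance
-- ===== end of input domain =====

-- B transposes the traversal: one empty dict per data row, filled column by column with the
-- column's key computed once per table, instead of A's row-by-row per-cell header lookup.

-- ===== PORT A =====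
-- headers = [str(h).strip() if h else f"col_{i}" for i, h in enumerate(table[0])]
def pvHeadersA (hrow : List String) : List String :=
  (PySem.List.enumerate hrow).map
    (fun p => if p.2 ≠ "" then PySem.Str.strip p.2 else "col_" ++ PySem.Int.toStr p.1)

-- inner loop: for i, cell in enumerate(row): row_dict[key] = …
def pvRowDictA (headers : List String) (row : List String) : PySem.Dict String String :=
  (PySem.List.enumerate row).foldl
    (fun d p =>
      let key := if p.1 < (headers.length : Int) then PySem.List.pyGetD headers p.1 ""
                 else "col_" ++ PySem.Int.toStr p.1
      d.insert key (if p.2 ≠ "" then PySem.Str.strip p.2 else ""))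
    PySem.Dict.empty

def tables_to_dicts (tables : List (List (List String))) : List (List (List (String × String))) :=
  tables.foldl
    (fun result table =>
      if table.length < 2 then result
      else
        let headers := pvHeadersA (PySem.List.pyGetD table 0 [])
        let rows := (PySem.List.slice table (some 1)).foldl
          (fun rows row => rows ++ [(pvRowDictA headers row).items]) []
        result ++ [rows])
    []

-- ===== PORT B =====
-- key = str(header[i]).strip() if i < len(header) and header[i] else f"col_{i}"
def pvKeyB (header : List String) (i : Int) : String :=
  if i < (header.length : Int) ∧ PySem.List.pyGetD header i "" ≠ ""
  then PySem.Str.strip (PySem.List.pyGetD header i "")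
  else "col_" ++ PySem.Int.toStr i

-- one column pass: for d, row in zip(dicts, body): if i < len(row): d[key] = …
def pvColStep (header : List String) (body : List (List String))
    (dicts : List (PySem.Dict String String)) (i : Int) : List (PySem.Dict String String) :=
  (List.zip dicts body).map (fun p =>
    if i < (p.2.length : Int) then
      p.1.insert (pvKeyB header i)
        (if PySem.List.pyGetD p.2 i "" ≠ "" then PySem.Str.strip (PySem.List.pyGetD p.2 i "") else "")
    else p.1)

def pvTableB (table : List (List String)) : List (List (String × String)) :=
  let header := PySem.List.pyGetD table 0 []
  let body := PySem.List.slice table (some 1)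
  -- width = max(len(r) for r in table); table is nonempty here, so a fold with base 0 equals Python's max (lengths are ≥ 0)
  let width := (table.map (fun r => (r.length : Int))).foldl max 0
  ((PySem.List.pyRange 0 width 1).foldl (pvColStep header body)
      (body.map (fun _ => PySem.Dict.empty))).map PySem.Dict.items

def tables_to_dicts_alt (tables : List (List (List String))) : List (List (List (String × String))) :=
  tables.foldl
    (fun result table => if table.length < 2 then result else result ++ [pvTableB table]) []

-- ===== PRECONDITION & SPEC =====
def Spec_tables_to_dicts (tables : List (List (List String))) (out : List (List (List (String × String)))) : Prop := out = tables_to_dicts_alt tables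
instance (tables : List (List (List String))) (out : List (List (List (String × String)))) : Decidable (Spec_tables_to_dicts tables out) := by unfold Spec_tables_to_dicts; infer_instance

-- ===== CLAIM (what is proved, stated in full; the proofs are below) =====
def Claim_equal_tables_to_dicts : Prop := ∀ (tables : List (List (List String))), Dom_tables_to_dicts tables → Spec_tables_to_dicts tables (tables_to_dicts tables)

-- ===== LEMMAS AND PROOFS =====

-- the per-row effect of one column pass
def pvPerRow (header row : List String) (d : PySem.Dict String String) (i : Int) : PySem.Dict String String :=
  if i < (row.length : Int) then
    d.insert (pvKeyB header i)
      (if PySem.List.pyGetD row i "" ≠ "" then PySem.Str.strip (PySem.List.pyGetD row i "") else "")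
  else d

lemma pv_zip_map_left {α β : Type} (g : α × β → α) :
    ∀ (ds : List α) (body : List β), ds.length = body.length →
      List.zip ((List.zip ds body).map g) body = (List.zip ds body).map (fun p => (g p, p.2)) := by
  intro ds
  induction ds with
  | nil => intro body _; simp
  | cons d ds ih =>
    intro body h
    cases body with
    | nil => simp at h
    | cons r rs =>
      simp only [List.zip_cons_cons, List.map_cons]
      rw [ih rs (by simpa using h)]

-- the column loop factors through the rows: each row's dict is its own fold over the columns
lemma pv_cols_factor (header : List String) :
    ∀ (is : List Int) (ds : List (PySem.Dict String String)) (body : List (List String)),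
      ds.length = body.length →
      is.foldl (pvColStep header body) ds
        = (List.zip ds body).map (fun p => is.foldl (pvPerRow header p.2) p.1) := by
  intro is
  induction is with
  | nil =>
    intro ds body h
    simp [List.map_fst_zip (le_of_eq h)]
  | cons i is ih =>
    intro ds body h
    simp only [List.foldl_cons]
    have hstep : pvColStep header body ds i
        = (List.zip ds body).map (fun p => pvPerRow header p.2 p.1 i) := rfl
    rw [hstep, ih _ body (by simp [List.length_zip, h]), pv_zip_map_left _ ds body h,
        List.map_map]
    rfl

-- B's column key equals A's per-cell key expression
lemma pv_key_agree (hrow : List String) (i : Int) (h0 : 0 ≤ i) :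
    pvKeyB hrow i
    = (if i < ((pvHeadersA hrow).length : Int)
       then PySem.List.pyGetD (pvHeadersA hrow) i ""
       else "col_" ++ PySem.Int.toStr i) := by
  have hlen : (pvHeadersA hrow).length = hrow.length := by
    simp [pvHeadersA, PySem.List.length_enumerate]
  obtain ⟨j, rfl⟩ : ∃ j : Nat, i = (j : Int) := ⟨i.toNat, (Int.toNat_of_nonneg h0).symm⟩
  unfold pvKeyB
  by_cases hj : j < hrow.length
  · have hrowGet : PySem.List.pyGetD hrow (j : Int) "" = hrow[j] := by
      rw [PySem.List.pyGetD_eq_getElem hrow "" (by positivity) (by exact_mod_cast hj)]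
      simp
    have hhead : PySem.List.pyGetD (pvHeadersA hrow) (j : Int) ""
        = (if hrow[j] ≠ "" then PySem.Str.strip hrow[j] else "col_" ++ PySem.Int.toStr (j : Int)) := by
      rw [PySem.List.pyGetD_eq_getElem (pvHeadersA hrow) "" (by positivity) (by rw [hlen]; exact_mod_cast hj)]
      simp only [pvHeadersA, Int.toNat_natCast, List.getElem_map]
      rw [PySem.List.getElem_enumerate]
      simp
    have hj2 : ((j : Int) < ((pvHeadersA hrow).length : Int)) := by
      rw [hlen]; exact_mod_cast hj
    have hcast : (j : Int) < ((hrow.length : Nat) : Int) := by exact_mod_cast hj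
    rw [hrowGet, hhead, if_pos hj2]
    by_cases hc : hrow[j] = "" <;> simp [hc, hcast]
  · have h1 : ¬((j : Int) < ((hrow.length : Nat) : Int) ∧ PySem.List.pyGetD hrow (j : Int) "" ≠ "") := by
      rintro ⟨h, -⟩; exact hj (by exact_mod_cast h)
    have h2 : ¬((j : Int) < ((pvHeadersA hrow).length : Int)) := by
      rw [hlen]; exact fun h => hj (by exact_mod_cast h)
    rw [if_neg h1, if_neg h2]

-- columns past the row's end leave the row's dict unchanged
lemma pv_perRow_tail (header row : List String) :
    ∀ (is : List Int) (d : PySem.Dict String String),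
      (∀ i ∈ is, (row.length : Int) ≤ i) →
      is.foldl (pvPerRow header row) d = d := by
  intro is
  induction is with
  | nil => intro d _; rfl
  | cons i is ih =>
    intro d h
    have : pvPerRow header row d i = d := by
      unfold pvPerRow
      rw [if_neg (not_lt.mpr (h i (List.mem_cons_self)))]
    simp only [List.foldl_cons, this]
    exact ih d (fun j hj => h j (List.mem_cons_of_mem _ hj))

-- the per-row column fold up to any wide-enough width equals A's row loop
lemma pv_row_eq (hrow row : List String) (W : Int) (hW : (row.length : Int) ≤ W) :
    (PySem.List.pyRange 0 W 1).foldl (pvPerRow hrow row) PySem.Dict.empty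
      = pvRowDictA (pvHeadersA hrow) row := by
  rw [PySem.List.pyRange_one_append 0 (row.length : Int) W (by positivity) hW,
      List.foldl_append]
  rw [pv_perRow_tail hrow row _ _
      (fun i hi => ((PySem.List.mem_pyRange_one).mp hi).1)]
  unfold pvRowDictA
  rw [PySem.List.enumerate_eq_map_pyRange row ""]
  simp only [PySem.List.len_eq]
  rw [List.foldl_map]
  apply PySem.List.foldl_congr_mem
  intro d i hi
  obtain ⟨h0, hlt⟩ := (PySem.List.mem_pyRange_one).mp hi
  unfold pvPerRow
  rw [if_pos (by simpa using hlt)]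
  simp only []
  rw [pv_key_agree hrow i h0]

-- the Int-valued width fold is the cast of the Nat-valued one
lemma pv_width_cast : ∀ (l : List (List String)) (a : Nat),
    (l.map (fun r => (r.length : Int))).foldl max (a : Int)
      = (((l.map List.length).foldl max a : Nat) : Int) := by
  intro l
  induction l with
  | nil => intro a; simp
  | cons x xs ih =>
    intro a
    simp only [List.map_cons, List.foldl_cons]
    rw [← Nat.cast_max, ih]

-- per-table: B's column-major fill equals A's row loop
lemma pv_table_eq (hrow : List String) (rest : List (List String)) :
    (PySem.List.slice (hrow :: rest) (some 1)).foldl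
      (fun rows row => rows ++ [(pvRowDictA (pvHeadersA (PySem.List.pyGetD (hrow :: rest) 0 [])) row).items]) []
    = pvTableB (hrow :: rest) := by
  have hget : PySem.List.pyGetD (hrow :: rest) 0 [] = hrow := by
    rw [PySem.List.pyGetD_of_nonneg _ _ le_rfl]; simp
  have htail : PySem.List.slice (hrow :: rest) (some 1) = rest := by
    rw [PySem.List.slice_from_one]; rfl
  unfold pvTableB
  simp only [hget, htail]
  rw [PySem.List.foldl_append_singleton_eq_map, List.nil_append]
  rw [pv_cols_factor hrow _ _ rest (by simp)]
  have hzip : List.zip (rest.map (fun _ => (PySem.Dict.empty : PySem.Dict String String))) rest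
      = rest.map (fun r => ((PySem.Dict.empty : PySem.Dict String String), r)) := by
    conv_lhs => rw [show List.zip (rest.map (fun _ => (PySem.Dict.empty : PySem.Dict String String))) rest
      = List.zip (rest.map (fun _ => (PySem.Dict.empty : PySem.Dict String String))) (rest.map id) from by rw [List.map_id]]
    rw [List.zip_map']
    simp
  rw [hzip, List.map_map, List.map_map]
  apply List.map_congr_left
  intro row hmem
  simp only [Function.comp]
  rw [show ((0 : Int) = ((0 : Nat) : Int)) from rfl, pv_width_cast]
  simp only [Nat.cast_zero]
  rw [pv_row_eq hrow row _ (by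
    exact_mod_cast (PySem.List.le_foldl_max ((hrow :: rest).map List.length) 0).2
      row.length (List.mem_map_of_mem (List.mem_cons_of_mem _ hmem)))]

-- A's accumulator loop over tables equals B's, onto any accumulator
lemma pv_top (tables : List (List (List String))) :
    ∀ acc : List (List (List (String × String))),
    tables.foldl
      (fun result table =>
        if table.length < 2 then result
        else
          let headers := pvHeadersA (PySem.List.pyGetD table 0 [])
          let rows := (PySem.List.slice table (some 1)).foldl
            (fun rows row => rows ++ [(pvRowDictA headers row).items]) []
          result ++ [rows])
      acc
    = tables.foldl
        (fun result table => if table.length < 2 then result else result ++ [pvTableB table]) acc := by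
  induction tables with
  | nil => intro acc; rfl
  | cons t ts ih =>
    intro acc
    simp only [List.foldl_cons]
    by_cases h2 : t.length < 2
    · rw [if_pos h2, if_pos h2, ih]
    · rw [if_neg h2, if_neg h2, ih]
      obtain ⟨hrow, rest, rfl⟩ : ∃ h r, t = h :: r := by
        cases t with
        | nil => simp at h2
        | cons a b => exact ⟨a, b, rfl⟩
      rw [pv_table_eq hrow rest]

-- ===== VERDICT (by name: the statement is the Claim_ definition above) =====
theorem tables_to_dicts_spec : Claim_equal_tables_to_dicts := by
  intro tables _
  unfold Spec_tables_to_dicts tables_to_dicts tables_to_dicts_alt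
  exact pv_top tables []
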